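-- pv_equiv track=rewrite | github.com/Prakhar9001/ai-resume-intelligence | backend/app/ai/chunker.py | chunk_sections
-- ===== SOURCE A (Python) =====
-- MAX_CHUNK_WORDS = 300
--
-- def chunk_sections(sections: dict) -> list:
--     chunks = []
--
--     for section, content in sections.items():
--         if section in ["summary", "skills", "education"]:
--             chunks.append(make_chunk(section, content))
--         else:
--             chunks.extend(chunk_by_roles(section, content))
--
--     return chunks
--
-- def make_chunk(section, text, subsection=None):
--     return {
--         "section": section,
--         "subsection": subsection,
--         "text": text.strip()
--     }
--
-- def chunk_by_roles(section: str, text: str) -> list: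
--     lines = text.split("\n")
--     chunks = []
--
--     current_role = None
--     buffer = []
--
--     for line in lines:
--         if is_new_role(line):
--             if buffer:
--                 chunks.append(make_chunk(section, "\n".join(buffer), current_role))
--                 buffer = []
--             current_role = line.strip()
--         else:
--             buffer.append(line)
--
--     if buffer:
--         chunks.append(make_chunk(section, "\n".join(buffer), current_role))
--
--     return split_large_chunks(chunks)
--
-- def is_new_role(line: str) -> bool:
--     return (
--         len(line.split()) <= 8
--         and not line.strip().startswith("-")
--     )
--
-- def split_large_chunks(chunks: list) -> list:
--     final_chunks = []
--
--     for chunk in chunks: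
--         words = chunk["text"].split()
--         if len(words) <= MAX_CHUNK_WORDS:
--             final_chunks.append(chunk)
--         else:
--             for i in range(0, len(words), MAX_CHUNK_WORDS):
--                 split_text = " ".join(words[i:i + MAX_CHUNK_WORDS])
--                 final_chunks.append({
--                     **chunk,
--                     "text": split_text
--                 })
--
--     return final_chunks
-- ===== SOURCE B (Python) =====
-- MAX_CHUNK_WORDS = 300
--
-- def chunk_sections(sections: dict) -> list:
--     chunks = []
--     for section, content in sections.items():
--         if section in ["summary", "skills", "education"]:
--             chunks.append({"section": section, "subsection": None, "text": content.strip()})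
--         else:
--             role = None
--             buf = []
--             for line in content.split("\n"):
--                 if _is_new_role(line):
--                     if buf:
--                         _flush(chunks, section, role, buf)
--                         buf = []
--                     role = line.strip()
--                 else:
--                     buf.append(line)
--             if buf:
--                 _flush(chunks, section, role, buf)
--     return chunks
--
-- def _is_new_role(line):
--     return len(line.split()) <= 8 and not line.strip().startswith("-")
--
-- def _flush(chunks, section, role, buf):
--     # one flush point: small buffers keep their "\n"-joined text, oversized
--     # ones are emitted as successive space-rejoined blocks of MAX_CHUNK_WORDS
--     text = "\n".join(buf).strip()
--     words = text.split()
--     if len(words) <= MAX_CHUNK_WORDS: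
--         chunks.append({"section": section, "subsection": role, "text": text})
--     else:
--         while words:
--             chunks.append({"section": section, "subsection": role,
--                            "text": " ".join(words[:MAX_CHUNK_WORDS])})
--             words = words[MAX_CHUNK_WORDS:]
-- ===== Notes on version B (the rewrite author's own statement) =====
-- stated objective: alternative
-- what changed: B fuses chunk_by_roles and split_large_chunks into one pass: each buffer flush directly emits either the single small chunk or the space-rejoined oversized blocks (via take/drop on the remaining words), instead of building an intermediate chunk list and re-scanning it; dict literals replace make_chunk/dict-update.
import Mathlib
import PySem

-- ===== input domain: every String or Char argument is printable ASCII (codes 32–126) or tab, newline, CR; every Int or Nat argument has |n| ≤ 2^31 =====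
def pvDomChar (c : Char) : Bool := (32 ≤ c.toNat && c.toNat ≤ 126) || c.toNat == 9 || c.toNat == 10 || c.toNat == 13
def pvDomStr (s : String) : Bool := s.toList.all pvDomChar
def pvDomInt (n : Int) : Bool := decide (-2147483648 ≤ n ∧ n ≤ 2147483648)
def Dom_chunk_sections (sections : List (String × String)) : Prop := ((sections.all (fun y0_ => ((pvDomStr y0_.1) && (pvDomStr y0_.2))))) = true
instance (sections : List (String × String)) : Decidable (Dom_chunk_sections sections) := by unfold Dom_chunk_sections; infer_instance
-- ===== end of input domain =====

-- Equivalence of A's two-pass chunker with B's fused one-pass chunker (same role detection,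
-- small chunks keep the "\n"-joined text, oversized ones are re-joined with spaces).

-- ===== PORT A =====
-- s.split("\n") with the non-empty literal separator; split? is none only for sep = ""
def pvSplitNL (s : String) : List String := (PySem.Str.split? s "\n").getD []

-- shared by both ports (Python: is_new_role, identical helper in Source B)
def pvIsNewRole (line : String) : Bool :=
  decide ((PySem.Str.split₀ line).length ≤ 8) && !(PySem.Str.startswith (PySem.Str.strip line) "-")

-- make_chunk: dict literal in insertion order (section, subsection, text)
def pvMkChunk (sec : String) (text : String) (sub : Option String) : PySem.Dict String (Option String) :=
  ((PySem.Dict.empty.insert "section" (some sec)).insert "subsection" sub).insert "text" (some (PySem.Str.strip text))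

-- split_large_chunks (chunk["text"] always present on A's chunks; getD reads it)
def pvSplitLarge (chunks : List (PySem.Dict String (Option String))) : List (PySem.Dict String (Option String)) :=
  chunks.foldl (fun acc c =>
    let words := PySem.Str.split₀ (((c.getD "text" none).getD ""))
    if words.length ≤ 300 then acc ++ [c]
    else (PySem.List.pyRange 0 (words.length : Int) 300).foldl
      (fun acc2 i => acc2 ++ [c.insert "text"
          (some (PySem.Str.join " " (PySem.List.slice words (some i) (some (i + 300)))))]) acc) []

-- the body of chunk_by_roles' for-loop, over the state (chunks, current_role, buffer)
def stepA (sec : String)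
    (st : List (PySem.Dict String (Option String)) × Option String × List String)
    (line : String) : List (PySem.Dict String (Option String)) × Option String × List String :=
  if pvIsNewRole line then
    ((if st.2.2.isEmpty then st.1
      else st.1 ++ [pvMkChunk sec (PySem.Str.join "\n" st.2.2) st.2.1]),
     some (PySem.Str.strip line), [])
  else (st.1, st.2.1, st.2.2 ++ [line])

-- chunk_by_roles: fold over lines, then final flush, then split_large_chunks
def pvChunkByRoles (sec : String) (text : String) : List (PySem.Dict String (Option String)) :=
  let lines := pvSplitNL text
  let st := lines.foldl (stepA sec) ([], none, [])
  let chunks := if st.2.2.isEmpty then st.1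
                else st.1 ++ [pvMkChunk sec (PySem.Str.join "\n" st.2.2) st.2.1]
  pvSplitLarge chunks

def chunk_sections (sections : List (String × String)) : List (List (String × Option String)) :=
  (sections.foldl (fun acc p =>
    if p.1 ∈ (["summary", "skills", "education"] : List String) then acc ++ [pvMkChunk p.1 p.2 none]
    else acc ++ pvChunkByRoles p.1 p.2) []).map (fun d => d.items)

-- ===== PORT B =====
-- B builds the row lists (dict literals) directly
def pvChunkRow (sec : String) (sub : Option String) (text : String) : List (String × Option String) :=
  [("section", some sec), ("subsection", sub), ("text", some text)]

-- the while-loop of _flush: peel MAX_CHUNK_WORDS words off the front until none remain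
def pvBlocks (sec : String) (sub : Option String) (words : List String) : List (List (String × Option String)) :=
  if words.isEmpty then []
  else pvChunkRow sec sub (PySem.Str.join " " (words.take 300)) :: pvBlocks sec sub (words.drop 300)
termination_by words.length
decreasing_by
  rename_i h
  simp only [List.isEmpty_iff] at h
  have : 0 < words.length := List.length_pos_iff.mpr h
  simp only [List.length_drop]; omega

-- _flush: emit one small chunk or the oversized blocks
def pvFlush (sec : String) (sub : Option String) (buf : List String) : List (List (String × Option String)) :=
  let text := PySem.Str.strip (PySem.Str.join "\n" buf)
  let words := PySem.Str.split₀ text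
  if words.length ≤ 300 then [pvChunkRow sec sub text]
  else pvBlocks sec sub words

-- the body of B's fused line loop: a boundary line flushes the buffer straight into out
def stepB (sec : String)
    (st : List (List (String × Option String)) × Option String × List String)
    (line : String) : List (List (String × Option String)) × Option String × List String :=
  if pvIsNewRole line then
    ((if st.2.2.isEmpty then st.1 else st.1 ++ pvFlush sec st.2.1 st.2.2),
     some (PySem.Str.strip line), [])
  else (st.1, st.2.1, st.2.2 ++ [line])

def chunk_sections_alt (sections : List (String × String)) : List (List (String × Option String)) :=
  sections.foldl (fun out p =>
    if p.1 ∈ (["summary", "skills", "education"] : List String) then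
      out ++ [pvChunkRow p.1 none (PySem.Str.strip p.2)]
    else
      let st := (pvSplitNL p.2).foldl (stepB p.1) (out, none, [])
      if st.2.2.isEmpty then st.1 else st.1 ++ pvFlush p.1 st.2.1 st.2.2) []

-- ===== PRECONDITION & SPEC =====
def Spec_chunk_sections (sections : List (String × String)) (out : List (List (String × Option String))) : Prop := out = chunk_sections_alt sections
instance (sections : List (String × String)) (out : List (List (String × Option String))) : Decidable (Spec_chunk_sections sections out) := by unfold Spec_chunk_sections; infer_instance

-- ===== CLAIM (what is proved, stated in full; the proofs are below) =====
def Claim_equal_chunk_sections : Prop := ∀ (sections : List (String × String)), Dom_chunk_sections sections → Spec_chunk_sections sections (chunk_sections sections)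

-- ===== LEMMAS AND PROOFS =====

-- one chunk through split_large_chunks (the body of A's second pass, as a map)
def splitOneA (c : PySem.Dict String (Option String)) : List (PySem.Dict String (Option String)) :=
  let words := PySem.Str.split₀ ((c.getD "text" none).getD "")
  if words.length ≤ 300 then [c]
  else (PySem.List.pyRange 0 (words.length : Int) 300).map (fun i => c.insert "text"
    (some (PySem.Str.join " " (PySem.List.slice words (some i) (some (i + 300))))))

def pvRowsOf (c : PySem.Dict String (Option String)) : List (List (String × Option String)) :=
  (splitOneA c).map (fun d => d.items)

theorem items_mkChunk (sec t : String) (sub : Option String) :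
    (pvMkChunk sec t sub).items = pvChunkRow sec sub (PySem.Str.strip t) := rfl

theorem items_insert_text (sec t : String) (sub : Option String) (u : String) :
    ((pvMkChunk sec t sub).insert "text" (some u)).items = pvChunkRow sec sub u := rfl

theorem getD_text_mkChunk (sec t : String) (sub : Option String) :
    ((pvMkChunk sec t sub).getD "text" none).getD "" = PySem.Str.strip t := rfl

theorem splitLarge_eq (chunks : List (PySem.Dict String (Option String))) :
    pvSplitLarge chunks = chunks.flatMap splitOneA := by
  suffices h : ∀ (cs : List (PySem.Dict String (Option String))) acc,
      cs.foldl (fun acc c =>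
        let words := PySem.Str.split₀ (((c.getD "text" none).getD ""))
        if words.length ≤ 300 then acc ++ [c]
        else (PySem.List.pyRange 0 (words.length : Int) 300).foldl
          (fun acc2 i => acc2 ++ [c.insert "text"
              (some (PySem.Str.join " " (PySem.List.slice words (some i) (some (i + 300)))))]) acc) acc
      = acc ++ cs.flatMap splitOneA by
    unfold pvSplitLarge
    rw [h chunks []]
    exact (List.nil_append _)
  intro cs
  induction cs with
  | nil => intro acc; simp
  | cons c cs ih =>
    intro acc
    rw [List.foldl_cons, List.flatMap_cons, ih]
    unfold splitOneA
    by_cases hc : (PySem.Str.split₀ (((c.getD "text" none).getD ""))).length ≤ 300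
    · simp [hc]
    · simp only [hc, if_false, PySem.List.foldl_append_singleton_eq_map]
      simp [List.append_assoc]

theorem pyRange300_map {β : Type} (words : List String) (F : List String → β) :
    (PySem.List.pyRange 0 (words.length : Int) 300).map
        (fun i => F (PySem.List.slice words (some i) (some (i + 300))))
      = (List.range ((words.length + 299) / 300)).map (fun k => F ((words.drop (300 * k)).take 300)) := by
  rw [PySem.List.pyRange_of_pos 0 (words.length : Int) (by norm_num), List.map_map]
  have hN : (if (0:Int) < (words.length : Int) then (((words.length : Int) - 0 + 300 - 1) / 300).toNat else 0)
      = (words.length + 299) / 300 := by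
    split_ifs with h
    · have h1 : ((words.length : Int) - 0 + 300 - 1) = ((words.length + 299 : Nat) : Int) := by push_cast; ring
      rw [h1]
      have h2 : ((300 : Int)) = ((300 : Nat) : Int) := by norm_num
      rw [h2, ← Int.natCast_div, Int.toNat_natCast]
    · have hl : words.length = 0 := by
        by_contra hne
        exact h (by exact_mod_cast Nat.pos_of_ne_zero hne)
      simp [hl]
  rw [hN]
  apply List.map_congr_left
  intro k _
  have hs : PySem.List.slice words (some ((0 : Int) + 300 * (k : Int))) (some ((0 : Int) + 300 * (k : Int) + 300))
      = (words.drop (300 * k)).take 300 := by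
    have h3 : ((0 : Int) + 300 * (k : Int)) = ((300 * k : Nat) : Int) := by push_cast; ring
    rw [h3]
    exact_mod_cast PySem.List.slice_natCast_add words (300 * k) 300
  simp only [Function.comp, hs]

theorem pvBlocks_eq (N : Nat) (sec : String) (sub : Option String) (words : List String)
    (h : N = (words.length + 299) / 300) :
    (List.range N).map (fun k => pvChunkRow sec sub (PySem.Str.join " " ((words.drop (300 * k)).take 300)))
      = pvBlocks sec sub words := by
  induction N generalizing words with
  | zero =>
    have hl : words.length = 0 := by omega
    have hw : words = [] := List.eq_nil_of_length_eq_zero hl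
    subst hw
    rw [pvBlocks]
    simp
  | succ N ih =>
    have hl : 0 < words.length := by omega
    have hne : words.isEmpty = false := by
      simp only [List.isEmpty_eq_false_iff]
      exact List.ne_nil_of_length_pos hl
    rw [pvBlocks]
    rw [hne]
    simp only [Bool.false_eq_true, if_false]
    rw [List.range_succ_eq_map, List.map_cons, List.map_map]
    congr 1
    have hrec := ih (words.drop 300) (by simp only [List.length_drop]; omega)
    rw [← hrec]
    apply List.map_congr_left
    intro k _
    simp only [Function.comp, List.drop_drop]
    have h300 : 300 * (k + 1) = 300 * k + 300 := by ring
    have h300' : 300 * (k + 1) = 300 + 300 * k := by ring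
    rw [h300]
    ring_nf

theorem rowsOf_mkChunk (sec : String) (sub : Option String) (buf : List String) :
    pvRowsOf (pvMkChunk sec (PySem.Str.join "\n" buf) sub) = pvFlush sec sub buf := by
  unfold pvRowsOf splitOneA pvFlush
  simp only [getD_text_mkChunk]
  by_cases hc : (PySem.Str.split₀ (PySem.Str.strip (PySem.Str.join "\n" buf))).length ≤ 300
  · simp only [hc, if_true, List.map_cons, List.map_nil, items_mkChunk]
  · simp only [hc, if_false, List.map_map]
    have hmap : ((fun d => PySem.Dict.items d) ∘ fun i =>
        (pvMkChunk sec (PySem.Str.join "\n" buf) sub).insert "text"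
          (some (PySem.Str.join " " (PySem.List.slice
            (PySem.Str.split₀ (PySem.Str.strip (PySem.Str.join "\n" buf))) (some i) (some (i + 300))))))
        = (fun i => pvChunkRow sec sub (PySem.Str.join " " (PySem.List.slice
            (PySem.Str.split₀ (PySem.Str.strip (PySem.Str.join "\n" buf))) (some i) (some (i + 300))))) := by
      funext i
      exact items_insert_text sec (PySem.Str.join "\n" buf) sub _
    rw [hmap]
    rw [pyRange300_map (PySem.Str.split₀ (PySem.Str.strip (PySem.Str.join "\n" buf)))
        (fun ws => pvChunkRow sec sub (PySem.Str.join " " ws))]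
    exact pvBlocks_eq _ sec sub _ rfl

theorem map_items_splitLarge (cs : List (PySem.Dict String (Option String))) :
    (pvSplitLarge cs).map (fun d => d.items) = cs.flatMap pvRowsOf := by
  rw [splitLarge_eq, List.map_flatMap]
  rfl

theorem loop_eq (sec : String) (lines : List String) :
    ∀ (chunks : List (PySem.Dict String (Option String))) (role : Option String)
      (buf : List String) (pre : List (List (String × Option String))),
    lines.foldl (stepB sec) (pre ++ chunks.flatMap pvRowsOf, role, buf)
      = (pre ++ (lines.foldl (stepA sec) (chunks, role, buf)).1.flatMap pvRowsOf,
         (lines.foldl (stepA sec) (chunks, role, buf)).2.1,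
         (lines.foldl (stepA sec) (chunks, role, buf)).2.2) := by
  induction lines with
  | nil => intro chunks role buf pre; rfl
  | cons l ls ih =>
    intro chunks role buf pre
    rw [List.foldl_cons, List.foldl_cons]
    by_cases hr : pvIsNewRole l = true
    · by_cases hb : buf.isEmpty = true
      · have hB : stepB sec (pre ++ chunks.flatMap pvRowsOf, role, buf) l
            = (pre ++ chunks.flatMap pvRowsOf, some (PySem.Str.strip l), []) := by
          simp [stepB, hr, hb]
        have hA : stepA sec (chunks, role, buf) l = (chunks, some (PySem.Str.strip l), []) := by
          simp [stepA, hr, hb]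
        rw [hB, hA]
        exact ih chunks (some (PySem.Str.strip l)) [] pre
      · have hB : stepB sec (pre ++ chunks.flatMap pvRowsOf, role, buf) l
            = (pre ++ (chunks ++ [pvMkChunk sec (PySem.Str.join "\n" buf) role]).flatMap pvRowsOf,
               some (PySem.Str.strip l), []) := by
          simp only [stepB, hr, if_true]
          simp only [eq_false hb, if_false]
          rw [List.flatMap_append, List.flatMap_cons, List.flatMap_nil,
              List.append_nil, rowsOf_mkChunk, List.append_assoc]
        have hA : stepA sec (chunks, role, buf) l
            = (chunks ++ [pvMkChunk sec (PySem.Str.join "\n" buf) role],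
               some (PySem.Str.strip l), []) := by
          simp only [stepA, hr, if_true]
          simp only [eq_false hb, if_false]
        rw [hB, hA]
        exact ih _ (some (PySem.Str.strip l)) [] pre
    · have hB : stepB sec (pre ++ chunks.flatMap pvRowsOf, role, buf) l
          = (pre ++ chunks.flatMap pvRowsOf, role, buf ++ [l]) := by
        simp [stepB, hr]
      have hA : stepA sec (chunks, role, buf) l = (chunks, role, buf ++ [l]) := by
        simp [stepA, hr]
      rw [hB, hA]
      exact ih chunks role (buf ++ [l]) pre

-- ===== VERDICT (by name: the statement is the Claim_ definition above) =====
theorem chunk_sections_spec : Claim_equal_chunk_sections := by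
  intro sections _
  show chunk_sections sections = chunk_sections_alt sections
  suffices h : ∀ (secs : List (String × String)) (accA : List (PySem.Dict String (Option String))),
      secs.foldl (fun out p =>
          if p.1 ∈ (["summary", "skills", "education"] : List String) then
            out ++ [pvChunkRow p.1 none (PySem.Str.strip p.2)]
          else
            let st := (pvSplitNL p.2).foldl (stepB p.1) (out, none, [])
            if st.2.2.isEmpty then st.1 else st.1 ++ pvFlush p.1 st.2.1 st.2.2)
        (accA.map (fun d => d.items))
      = (secs.foldl (fun acc p =>
          if p.1 ∈ (["summary", "skills", "education"] : List String) then acc ++ [pvMkChunk p.1 p.2 none]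
          else acc ++ pvChunkByRoles p.1 p.2) accA).map (fun d => d.items) by
    have h0 := h sections []
    simp only [List.map_nil] at h0
    exact (h0.symm : _)
  intro secs
  induction secs with
  | nil => intro accA; simp
  | cons p ps ih =>
    intro accA
    rw [List.foldl_cons, List.foldl_cons]
    by_cases hm : p.1 ∈ (["summary", "skills", "education"] : List String)
    · rw [if_pos hm, if_pos hm]
      have : accA.map (fun d => d.items) ++ [pvChunkRow p.1 none (PySem.Str.strip p.2)]
          = (accA ++ [pvMkChunk p.1 p.2 none]).map (fun d => d.items) := by
        rw [List.map_append, List.map_cons, List.map_nil, items_mkChunk]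
      rw [this]
      exact ih (accA ++ [pvMkChunk p.1 p.2 none])
    · rw [if_neg hm, if_neg hm]
      have hpre : accA.map (fun d => d.items)
          = accA.map (fun d => d.items)
            ++ ([] : List (PySem.Dict String (Option String))).flatMap pvRowsOf := by simp
      conv_lhs => rw [hpre]
      rw [loop_eq p.1 (pvSplitNL p.2) [] none [] (accA.map (fun d => d.items))]
      set stA := (pvSplitNL p.2).foldl (stepA p.1) ([], none, []) with hstA
      by_cases hb : stA.2.2.isEmpty = true
      · simp only [hb, if_true]
        have : accA.map (fun d => d.items) ++ stA.1.flatMap pvRowsOf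
            = (accA ++ pvChunkByRoles p.1 p.2).map (fun d => d.items) := by
          rw [List.map_append]
          simp only [pvChunkByRoles]
          rw [← hstA, hb]
          simp only [if_true]
          rw [map_items_splitLarge]
        rw [this]
        exact ih (accA ++ pvChunkByRoles p.1 p.2)
      · simp only [eq_false hb, if_false]
        have : accA.map (fun d => d.items) ++ stA.1.flatMap pvRowsOf
                ++ pvFlush p.1 stA.2.1 stA.2.2
            = (accA ++ pvChunkByRoles p.1 p.2).map (fun d => d.items) := by
          rw [List.map_append]
          simp only [pvChunkByRoles]
          rw [← hstA]
          simp only [eq_false hb, if_false]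
          rw [map_items_splitLarge, List.flatMap_append, List.flatMap_cons, List.flatMap_nil,
              List.append_nil, rowsOf_mkChunk, List.append_assoc]
        rw [this]
        exact ih (accA ++ pvChunkByRoles p.1 p.2)
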